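-- pv_equiv track=rewrite | github.com/taoweicn/machine-learning | bayes_model/task2/NBC.py | text_features
-- ===== SOURCE A (Python) =====
-- def text_features(train_data_list, test_data_list, feature_words):
--     """
--     函数说明:根据feature_words将文本向量化
--     Parameters:
--         train_data_list - 训练集
--         test_data_list - 测试集
--         feature_words - 特征集
--     Returns:
--         train_feature_list - 训练集向量化列表
--         test_feature_list - 测试集向量化列表
--     """
--
--     def __text_features(text, feature_words):
--         text_words = set(text)
--         features = [1 if word in text_words else 0 for word in feature_words]
--         return features
--
--     train_feature_list = [__text_features(text, feature_words) for text in train_data_list]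
--     test_feature_list = [__text_features(text, feature_words) for text in test_data_list]
--     return train_feature_list, test_feature_list
-- ===== SOURCE B (Python) =====
-- def text_features(train_data_list, test_data_list, feature_words):
--     # Invert the feature list once: word -> all its positions; then mark
--     # positions per text instead of scanning feature_words for every text.
--     index = {}
--     for i, w in enumerate(feature_words):
--         index.setdefault(w, []).append(i)
--     n = len(feature_words)
--
--     def vectorize(text):
--         vec = [0] * n
--         for w in set(text):
--             for i in index.get(w, []):
--                 vec[i] = 1
--         return vec
--
--     return [vectorize(t) for t in train_data_list], [vectorize(t) for t in test_data_list]
-- ===== Notes on version B (the rewrite author's own statement) =====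
-- stated objective: alternative
-- what changed: B builds a word-to-positions index over feature_words once and fills a zero vector by marking the positions of each distinct word of the text, instead of scanning all of feature_words with a set-membership test for every text.
import Mathlib
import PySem

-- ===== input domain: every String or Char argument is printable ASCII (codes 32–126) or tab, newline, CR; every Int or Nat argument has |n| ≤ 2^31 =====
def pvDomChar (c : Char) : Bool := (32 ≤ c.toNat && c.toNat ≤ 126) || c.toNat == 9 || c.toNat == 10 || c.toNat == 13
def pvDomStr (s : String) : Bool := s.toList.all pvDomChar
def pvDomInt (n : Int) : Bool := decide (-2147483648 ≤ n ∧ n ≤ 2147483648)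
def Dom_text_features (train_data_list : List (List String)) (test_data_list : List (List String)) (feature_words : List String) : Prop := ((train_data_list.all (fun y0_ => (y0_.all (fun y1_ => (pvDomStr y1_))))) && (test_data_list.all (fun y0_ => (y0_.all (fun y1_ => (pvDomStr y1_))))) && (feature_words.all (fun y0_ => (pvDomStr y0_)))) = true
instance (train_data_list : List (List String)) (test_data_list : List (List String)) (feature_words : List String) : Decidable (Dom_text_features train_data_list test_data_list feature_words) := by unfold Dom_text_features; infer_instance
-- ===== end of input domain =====

-- B inverts feature_words into a word→positions index once and marks positions in a zero
-- vector per text, instead of scanning all of feature_words per text (objective: alternative).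

-- ===== PORT A =====
-- __text_features of A
def pvAFeat (text : List String) (feature_words : List String) : List Int :=
  let text_words : PySem.Set String := PySem.Set.ofList text
  feature_words.map (fun word => if word ∈ text_words then (1 : Int) else 0)

def text_features (train_data_list : List (List String)) (test_data_list : List (List String)) (feature_words : List String) : List (List Int) × List (List Int) :=
  let train_feature_list := train_data_list.map (fun text => pvAFeat text feature_words)
  let test_feature_list := test_data_list.map (fun text => pvAFeat text feature_words)
  (train_feature_list, test_feature_list)

-- ===== PORT B =====
-- index built by 'for i, w in enumerate(feature_words): index.setdefault(w, []).append(i)'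
def pvIndex (feature_words : List String) : PySem.Dict String (List Int) :=
  (PySem.List.enumerate feature_words).foldl
    (fun d p => d.insert p.2 (d.getD p.2 [] ++ [p.1])) PySem.Dict.empty

-- 'for i in index.get(w, []): vec[i] = 1'
def pvMark (vec : List Int) (ps : List Int) : List Int :=
  ps.foldl (fun v i => PySem.List.pySetD v i 1) vec

-- vectorize(text): zero vector, then mark the positions of each distinct word of text.
-- (Python iterates set(text) in hash order; marking 1s is order-independent, so the
-- first-occurrence order of PySem.Set.ofList is exact.)
def pvVectorize (idx : PySem.Dict String (List Int)) (n : Nat) (text : List String) : List Int :=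
  (PySem.Set.ofList text).foldl (fun v w => pvMark v (idx.getD w [])) (List.replicate n 0)

def text_features_alt (train_data_list : List (List String)) (test_data_list : List (List String)) (feature_words : List String) : List (List Int) × List (List Int) :=
  let idx := pvIndex feature_words
  let n := feature_words.length
  (train_data_list.map (fun t => pvVectorize idx n t),
   test_data_list.map (fun t => pvVectorize idx n t))

-- ===== PRECONDITION & SPEC =====
def Spec_text_features (train_data_list : List (List String)) (test_data_list : List (List String)) (feature_words : List String) (out : List (List Int) × List (List Int)) : Prop := out = text_features_alt train_data_list test_data_list feature_words
instance (train_data_list : List (List String)) (test_data_list : List (List String)) (feature_words : List String) (out : List (List Int) × List (List Int)) : Decidable (Spec_text_features train_data_list test_data_list feature_words out) := by unfold Spec_text_features; infer_instance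

-- ===== CLAIM (what is proved, stated in full; the proofs are below) =====
def Claim_equal_text_features : Prop := ∀ (train_data_list : List (List String)) (test_data_list : List (List String)) (feature_words : List String), Dom_text_features train_data_list test_data_list feature_words → Spec_text_features train_data_list test_data_list feature_words (text_features train_data_list test_data_list feature_words)

-- ===== LEMMAS AND PROOFS =====

-- membership in the index built over any association-fold prefix
theorem pv_go_mem (l : List (Int × String)) (d : PySem.Dict String (List Int))
    (w : String) (i : Int) :
    i ∈ (l.foldl (fun d p => d.insert p.2 (d.getD p.2 [] ++ [p.1])) d).getD w [] ↔
      i ∈ d.getD w [] ∨ (i, w) ∈ l := by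
  induction l generalizing d with
  | nil => simp
  | cons p l ih =>
    simp only [List.foldl_cons, ih, PySem.Dict.getD_insert, List.mem_cons, Prod.ext_iff]
    by_cases h : w = p.2 <;> simp [h] <;> tauto

theorem pv_index_mem (feature_words : List String) (w : String) (i : Int) :
    i ∈ (pvIndex feature_words).getD w [] ↔
      ∃ k : Nat, ∃ h : k < feature_words.length, i = (k : Int) ∧ feature_words[k] = w := by
  unfold pvIndex
  rw [pv_go_mem]
  simp [PySem.List.mem_enumerate_iff, Prod.ext_iff, eq_comm]

theorem pv_index_nonneg (feature_words : List String) (w : String) (i : Int)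
    (h : i ∈ (pvIndex feature_words).getD w []) : 0 ≤ i := by
  rw [pv_index_mem] at h
  obtain ⟨k, _, rfl, _⟩ := h
  exact Int.natCast_nonneg k

theorem pv_mark_length (vec : List Int) (ps : List Int) :
    (pvMark vec ps).length = vec.length := by
  unfold pvMark
  induction ps generalizing vec with
  | nil => rfl
  | cons i ps ih => simp [ih, PySem.List.length_pySetD]

theorem pv_mark_getElem? (ps : List Int) (vec : List Int) (j : Nat)
    (hnn : ∀ i ∈ ps, 0 ≤ i) :
    (pvMark vec ps)[j]? =
      if (j : Int) ∈ ps ∧ j < vec.length then some 1 else vec[j]? := by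
  induction ps generalizing vec with
  | nil => simp [pvMark]
  | cons i ps ih =>
    have hi : 0 ≤ i := hnn i (List.mem_cons_self ..)
    have hstep : pvMark vec (i :: ps) = pvMark (vec.set i.toNat 1) ps := by
      simp [pvMark, PySem.List.pySetD_of_nonneg vec 1 hi]
    rw [hstep, ih _ (fun x hx => hnn x (List.mem_cons_of_mem _ hx))]
    simp only [List.length_set, List.getElem?_set, List.mem_cons]
    by_cases h1 : (j : Int) ∈ ps <;> by_cases h2 : j < vec.length <;>
      by_cases h3 : (j : Int) = i <;>
      simp_all <;> omega

theorem pv_fold_mark_getElem? (idx : PySem.Dict String (List Int))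
    (hidx : ∀ w i, i ∈ idx.getD w [] → 0 ≤ i) (ws : List String) (vec : List Int) (j : Nat) :
    (ws.foldl (fun v w => pvMark v (idx.getD w [])) vec)[j]? =
      if (∃ w ∈ ws, (j : Int) ∈ idx.getD w []) ∧ j < vec.length then some 1 else vec[j]? := by
  induction ws generalizing vec with
  | nil => simp
  | cons w ws ih =>
    rw [List.foldl_cons, ih, pv_mark_length,
      pv_mark_getElem? _ _ _ (fun i hi => hidx w i hi)]
    by_cases h1 : ∃ w' ∈ ws, (j : Int) ∈ idx.getD w' [] <;>
      by_cases h2 : (j : Int) ∈ idx.getD w [] <;>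
      by_cases h3 : j < vec.length <;> simp_all

theorem pv_vec_eq (feature_words : List String) (text : List String) :
    pvVectorize (pvIndex feature_words) feature_words.length text = pvAFeat text feature_words := by
  apply List.ext_getElem?
  intro j
  unfold pvVectorize pvAFeat
  rw [pv_fold_mark_getElem? _ (pv_index_nonneg feature_words), List.length_replicate]
  by_cases hj : j < feature_words.length
  · have hcond : (∃ w ∈ PySem.Set.ofList text, (j : Int) ∈ (pvIndex feature_words).getD w []) ↔
        feature_words[j] ∈ text := by
      constructor
      · rintro ⟨w, hw, hmem⟩
        rw [pv_index_mem] at hmem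
        obtain ⟨k, hk, hjk, hfk⟩ := hmem
        have : k = j := by exact_mod_cast hjk.symm
        subst this
        rw [hfk]
        exact (PySem.Set.mem_ofList text w).1 hw
      · intro hmem
        refine ⟨feature_words[j], (PySem.Set.mem_ofList text _).2 hmem, ?_⟩
        rw [pv_index_mem]
        exact ⟨j, hj, rfl, rfl⟩
    rw [List.getElem?_map, List.getElem?_eq_getElem hj]
    by_cases hmem : feature_words[j] ∈ text <;>
      simp_all [PySem.Set.mem_ofList]
  · simp [hj]

-- ===== VERDICT (by name: the statement is the Claim_ definition above) =====
theorem text_features_spec : Claim_equal_text_features := by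
  intro train_data_list test_data_list feature_words _
  unfold Spec_text_features text_features text_features_alt
  simp only [pv_vec_eq]
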